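-- pv_equiv track=rewrite | github.com/goshng/polap | src/polaplib/polap-py-syncmer-connectivity-select-mt.py | bfs_expand
-- ===== SOURCE A (Python) =====
-- def bfs_expand(adj, seeds, steps):
--     cur = set(seeds)
--     frontier = set(seeds)
--     for _ in range(steps):
--         nxt = set()
--         for u in frontier:
--             for v, _ in adj.get(u, []):
--                 if v not in cur:
--                     nxt.add(v)
--         if not nxt:
--             break
--         cur |= nxt
--         frontier = nxt
--     return cur
-- ===== SOURCE B (Python) =====
-- def bfs_expand(adj, seeds, steps):
--     visited = set(seeds)
--     order = [(s, 0) for s in dict.fromkeys(seeds)]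
--     i = 0
--     while i < len(order):
--         u, d = order[i]
--         i += 1
--         if d < steps:
--             for v, _ in adj.get(u, []):
--                 if v not in visited:
--                     visited.add(v)
--                     order.append((v, d + 1))
--     return visited
-- ===== Notes on version B (the rewrite author's own statement) =====
-- stated objective: idiomatic
-- what changed: Replaces the per-level frontier-set loop over range(steps) by a single-queue BFS that tags each node with its distance on enqueue and marks nodes visited when first discovered.
import Mathlib
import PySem

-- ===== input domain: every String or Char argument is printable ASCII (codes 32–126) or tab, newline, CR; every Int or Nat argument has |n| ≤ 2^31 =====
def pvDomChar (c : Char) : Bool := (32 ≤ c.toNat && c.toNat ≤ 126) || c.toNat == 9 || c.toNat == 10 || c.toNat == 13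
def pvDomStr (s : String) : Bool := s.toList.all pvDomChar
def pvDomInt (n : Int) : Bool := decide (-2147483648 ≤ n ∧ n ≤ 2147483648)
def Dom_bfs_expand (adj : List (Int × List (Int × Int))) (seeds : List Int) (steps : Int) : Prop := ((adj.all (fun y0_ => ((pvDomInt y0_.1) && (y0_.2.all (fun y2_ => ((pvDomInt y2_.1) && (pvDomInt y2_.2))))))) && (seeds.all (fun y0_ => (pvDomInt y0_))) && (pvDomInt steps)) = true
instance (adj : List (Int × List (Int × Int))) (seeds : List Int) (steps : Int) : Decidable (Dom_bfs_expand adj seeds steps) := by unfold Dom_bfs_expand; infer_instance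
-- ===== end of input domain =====

-- B replaces A's per-level frontier-set loop by a single-queue BFS tagging each node with its
-- distance; same result set, same asymptotic cost (objective: idiomatic/alternative).

-- ===== PORT A =====
-- inner double loop of one level: fold the neighbours of u into nxt (v added if v not in cur)
def bfsA_innerU (adj : List (Int × List (Int × Int))) (cur : PySem.Set Int)
    (nxt : PySem.Set Int) (u : Int) : PySem.Set Int :=
  (PySem.Dict.getD ⟨adj⟩ u []).foldl
    (fun nxt vw => if PySem.Set.contains cur vw.1 then nxt else PySem.Set.add nxt vw.1) nxt

-- the 'for _ in range(steps)' loop with its break, as structural recursion on the trip count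
def bfsA_loop (adj : List (Int × List (Int × Int))) :
    Nat → PySem.Set Int → PySem.Set Int → PySem.Set Int
  | 0, cur, _ => cur
  | n + 1, cur, frontier =>
    let nxt := frontier.foldl (bfsA_innerU adj cur) PySem.Set.empty
    if nxt.isEmpty then cur
    else bfsA_loop adj n (PySem.Set.union cur nxt) nxt

def bfs_expand (adj : List (Int × List (Int × Int))) (seeds : List Int) (steps : Int) : List Int :=
  bfsA_loop adj steps.toNat (PySem.Set.ofList seeds) (PySem.Set.ofList seeds)

-- ===== PORT B =====
-- body of Source B's inner 'for v, _ in adj.get(u, [])' loop: state = (visited, appended queue entries)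
def bfsB_step (d1 : Int) (st : PySem.Set Int × List (Int × Int)) (vw : Int × Int) :
    PySem.Set Int × List (Int × Int) :=
  if PySem.Set.contains st.1 vw.1 then st
  else (PySem.Set.add st.1 vw.1, st.2 ++ [(vw.1, d1)])

def bfsB_scan (visited : PySem.Set Int) (nbrs : List (Int × Int)) (d1 : Int) :
    PySem.Set Int × List (Int × Int) :=
  nbrs.foldl (bfsB_step d1) (visited, [])

-- termination measure helpers for the queue loop (proof artefacts, not part of Source B's algorithm)
def pvAllN (adj : List (Int × List (Int × Int))) : List Int :=
  adj.flatMap (fun p => p.2.map Prod.fst)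

def pvCnt (adj : List (Int × List (Int × Int))) (visited : List Int) : Nat :=
  ((PySem.List.dedup (pvAllN adj)).filter (fun v => !(visited.contains v))).length

lemma pv_filter_ne_len {x : Int} : ∀ (A : List Int), x ∈ A →
    (A.filter (fun v => !(v == x))).length + 1 ≤ A.length := by
  intro A hx
  induction A with
  | nil => cases hx
  | cons a A ih =>
    by_cases ha : a = x
    · subst ha
      have hle := List.length_filter_le (fun v => !(v == a)) A
      simp only [List.filter_cons, beq_self_eq_true, Bool.not_true, Bool.false_eq_true,
        if_false, List.length_cons]
      omega
    · rcases List.mem_cons.mp hx with h | h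
      · exact absurd h.symm ha
      · have := ih h
        have hne : (!(a == x)) = true := by simp [ha]
        simp only [List.filter_cons, hne, if_true, List.length_cons]
        omega

lemma pvCnt_append (adj : List (Int × List (Int × Int))) (visited : List Int) (x : Int)
    (h1 : x ∈ pvAllN adj) (h2 : x ∉ visited) :
    pvCnt adj (visited ++ [x]) + 1 ≤ pvCnt adj visited := by
  unfold pvCnt
  have hpt : ∀ v : Int, (!((visited ++ [x]).contains v))
      = ((!(visited.contains v)) && (!(v == x))) := by
    intro v
    by_cases hv : v ∈ visited <;> by_cases hx : v = x <;>
      simp [hv, hx, List.mem_append]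
  have hfe : (PySem.List.dedup (pvAllN adj)).filter (fun v => !((visited ++ [x]).contains v))
      = ((PySem.List.dedup (pvAllN adj)).filter (fun v => !(visited.contains v))).filter
          (fun v => !(v == x)) := by
    rw [List.filter_filter]
    exact List.filter_congr (fun v _ => by rw [hpt v, Bool.and_comm])
  rw [hfe]
  apply pv_filter_ne_len
  rw [List.mem_filter]
  constructor
  · rw [PySem.List.dedup_eq_ofList]
    exact (PySem.Set.mem_ofList _ _).mpr h1
  · simp [h2]

lemma pv_getD_sub (adj : List (Int × List (Int × Int))) (u : Int) :
    ∀ p ∈ PySem.Dict.getD ⟨adj⟩ u [], p.1 ∈ pvAllN adj := by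
  intro p hp
  unfold PySem.Dict.getD PySem.Dict.get? at hp
  cases hfind : List.find? (fun q => q.1 == u) (PySem.Dict.mk adj).items with
  | none => rw [hfind] at hp; simp at hp
  | some pr =>
    rw [hfind] at hp
    simp only [Option.map_some, Option.getD_some] at hp
    have hmem : pr ∈ adj := List.mem_of_find?_eq_some hfind
    unfold pvAllN
    rw [List.mem_flatMap]
    exact ⟨pr, hmem, List.mem_map.mpr ⟨p, hp, rfl⟩⟩

lemma pvScan_bound (adj : List (Int × List (Int × Int))) (d1 : Int) :
    ∀ (nbrs : List (Int × Int)), (∀ p ∈ nbrs, p.1 ∈ pvAllN adj) →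
    ∀ (visited : List Int) (acc : List (Int × Int)),
    (nbrs.foldl (bfsB_step d1) (visited, acc)).2.length
        + pvCnt adj (nbrs.foldl (bfsB_step d1) (visited, acc)).1
      ≤ acc.length + pvCnt adj visited := by
  intro nbrs
  induction nbrs with
  | nil => intro _ visited acc; simp
  | cons p rest ih =>
    intro hsub visited acc
    have hsub' : ∀ q ∈ rest, q.1 ∈ pvAllN adj := fun q hq => hsub q (List.mem_cons_of_mem _ hq)
    simp only [List.foldl_cons]
    by_cases hc : p.1 ∈ visited
    · have hct : PySem.Set.contains visited p.1 = true := (PySem.Set.contains_iff _ _).mpr hc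
      have : bfsB_step d1 (visited, acc) p = (visited, acc) := by
        simp [bfsB_step, hc]
      rw [this]
      exact ih hsub' visited acc
    · have hcf : PySem.Set.contains visited p.1 = false := by
        rw [Bool.eq_false_iff]
        intro hcon
        exact hc ((PySem.Set.contains_iff _ _).mp hcon)
      have hstep : bfsB_step d1 (visited, acc) p
          = (visited ++ [p.1], acc ++ [(p.1, d1)]) := by
        simp [bfsB_step, hc]
      rw [hstep]
      have h2 := ih hsub' (visited ++ [p.1]) (acc ++ [(p.1, d1)])
      have h3 := pvCnt_append adj visited p.1 (hsub p (List.mem_cons_self)) hc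
      simp only [List.length_append, List.length_cons, List.length_nil] at h2 ⊢
      omega
-- Source B's 'while i < len(order)' loop: 'pending' is the unprocessed suffix order[i:]
def bfsB_loop (adj : List (Int × List (Int × Int))) (steps : Int)
    (visited : PySem.Set Int) (pending : List (Int × Int)) : PySem.Set Int :=
  match pending with
  | [] => visited
  | (u, d) :: rest =>
    if d < steps then
      let st := bfsB_scan visited (PySem.Dict.getD ⟨adj⟩ u []) (d + 1)
      bfsB_loop adj steps st.1 (rest ++ st.2)
    else bfsB_loop adj steps visited rest
termination_by pending.length + pvCnt adj visited
decreasing_by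
  · have h := pvScan_bound adj (d + 1) (PySem.Dict.getD ⟨adj⟩ u [])
      (pv_getD_sub adj u) visited []
    simp only [bfsB_scan] at *
    simp only [List.length_append, List.length_cons, List.length_nil] at *
    omega
  · simp only [List.length_cons]
    omega

def bfs_expand_alt (adj : List (Int × List (Int × Int))) (seeds : List Int) (steps : Int) : List Int :=
  bfsB_loop adj steps (PySem.Set.ofList seeds)
    ((PySem.List.dedup seeds).map (fun s => (s, 0)))

-- ===== PRECONDITION & SPEC =====
def Spec_bfs_expand (adj : List (Int × List (Int × Int))) (seeds : List Int) (steps : Int) (out : List Int) : Prop := out = bfs_expand_alt adj seeds steps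
instance (adj : List (Int × List (Int × Int))) (seeds : List Int) (steps : Int) (out : List Int) : Decidable (Spec_bfs_expand adj seeds steps out) := by unfold Spec_bfs_expand; infer_instance

-- ===== CLAIM (what is proved, stated in full; the proofs are below) =====
def Claim_equal_bfs_expand : Prop := ∀ (adj : List (Int × List (Int × Int))) (seeds : List Int) (steps : Int), Dom_bfs_expand adj seeds steps → Spec_bfs_expand adj seeds steps (bfs_expand adj seeds steps)

-- ===== LEMMAS AND PROOFS =====

-- one neighbour scan: B's fold over u's adjacency, started at visited = cur ++ nxt, adds exactly
-- the elements A's inner fold appends to nxt, and queues them at distance d1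
lemma pv_scan (cur : List Int) (d1 : Int) :
    ∀ (nbrs : List (Int × Int)) (nxt : List Int) (acc : List (Int × Int)),
    ∃ delta : List Int,
      nbrs.foldl
          (fun s vw => if PySem.Set.contains cur vw.1 then s else PySem.Set.add s vw.1) nxt
        = nxt ++ delta ∧
      nbrs.foldl (bfsB_step d1) (cur ++ nxt, acc)
        = (cur ++ (nxt ++ delta), acc ++ delta.map (fun v => (v, d1))) ∧
      (∀ x ∈ delta, x ∉ cur) ∧
      (nxt.Nodup → (nxt ++ delta).Nodup) := by
  intro nbrs
  induction nbrs with
  | nil =>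
    intro nxt acc
    exact ⟨[], by simp, by simp, by simp, by simp⟩
  | cons vw rest ih =>
    intro nxt acc
    by_cases hcu : vw.1 ∈ cur
    · have hct : PySem.Set.contains cur vw.1 = true := (PySem.Set.contains_iff _ _).mpr hcu
      have hcn : PySem.Set.contains (cur ++ nxt) vw.1 = true :=
        (PySem.Set.contains_iff _ _).mpr (List.mem_append.mpr (Or.inl hcu))
      have hA : (vw :: rest).foldl
          (fun s vw => if PySem.Set.contains cur vw.1 then s else PySem.Set.add s vw.1) nxt
          = rest.foldl
          (fun s vw => if PySem.Set.contains cur vw.1 then s else PySem.Set.add s vw.1) nxt := by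
        simp [hcu]
      have hB : (vw :: rest).foldl (bfsB_step d1) (cur ++ nxt, acc)
          = rest.foldl (bfsB_step d1) (cur ++ nxt, acc) := by
        simp [bfsB_step, hcu]
      rw [hA, hB]
      exact ih nxt acc
    · have hcf : PySem.Set.contains cur vw.1 = false := by
        rw [Bool.eq_false_iff]; intro h; exact hcu ((PySem.Set.contains_iff _ _).mp h)
      by_cases hn : vw.1 ∈ nxt
      · have hcn : PySem.Set.contains (cur ++ nxt) vw.1 = true :=
          (PySem.Set.contains_iff _ _).mpr (List.mem_append.mpr (Or.inr hn))
        have hA : (vw :: rest).foldl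
            (fun s vw => if PySem.Set.contains cur vw.1 then s else PySem.Set.add s vw.1) nxt
            = rest.foldl
            (fun s vw => if PySem.Set.contains cur vw.1 then s else PySem.Set.add s vw.1) nxt := by
          simp [hcu, PySem.Set.add_of_mem hn]
        have hB : (vw :: rest).foldl (bfsB_step d1) (cur ++ nxt, acc)
            = rest.foldl (bfsB_step d1) (cur ++ nxt, acc) := by
          simp [bfsB_step, hn]
        rw [hA, hB]
        exact ih nxt acc
      · have hcn : PySem.Set.contains (cur ++ nxt) vw.1 = false := by
          rw [Bool.eq_false_iff]; intro h
          rcases List.mem_append.mp ((PySem.Set.contains_iff _ _).mp h) with h' | h'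
          · exact hcu h'
          · exact hn h'
        have hA : (vw :: rest).foldl
            (fun s vw => if PySem.Set.contains cur vw.1 then s else PySem.Set.add s vw.1) nxt
            = rest.foldl
            (fun s vw => if PySem.Set.contains cur vw.1 then s else PySem.Set.add s vw.1)
              (nxt ++ [vw.1]) := by
          simp [hcu, PySem.Set.add_of_not_mem hn]
        have hB : (vw :: rest).foldl (bfsB_step d1) (cur ++ nxt, acc)
            = rest.foldl (bfsB_step d1) (cur ++ (nxt ++ [vw.1]), acc ++ [(vw.1, d1)]) := by
          have : PySem.Set.add (cur ++ nxt) vw.1 = cur ++ (nxt ++ [vw.1]) := by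
            rw [PySem.Set.add_of_not_mem (fun h => by
              rcases List.mem_append.mp h with h' | h'
              · exact hcu h'
              · exact hn h'), List.append_assoc]
          simp [bfsB_step, hcu, hn]
        obtain ⟨delta, h1, h2, h3, h4⟩ := ih (nxt ++ [vw.1]) (acc ++ [(vw.1, d1)])
        refine ⟨vw.1 :: delta, ?_, ?_, ?_, ?_⟩
        · rw [hA, h1, List.append_assoc]; rfl
        · rw [hB, h2]
          simp [List.append_assoc]
        · intro x hx
          rcases List.mem_cons.mp hx with h | h
          · subst h; exact hcu
          · exact h3 x h
        · intro hnd
          have := h4 (by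
            simp only [List.nodup_append, List.nodup_singleton, true_and, hnd]
            intro a ha b hb
            rw [List.mem_singleton] at hb
            subst hb
            intro h
            exact hn (h ▸ ha))
          simpa [List.append_assoc] using this

-- one whole level: running the queue through F (all at distance d < steps) visits cur ++ R and
-- leaves exactly R queued at distance d+1, where R is A's next frontier
lemma pv_level (adj : List (Int × List (Int × Int))) (steps : Int) (d : Int) (hd : d < steps) :
    ∀ (F : List Int) (cur nxt : List Int),
      (∀ x ∈ nxt, x ∉ cur) → nxt.Nodup →
      bfsB_loop adj steps (cur ++ nxt)
          (F.map (fun u => (u, d)) ++ nxt.map (fun v => (v, d + 1)))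
        = bfsB_loop adj steps (cur ++ F.foldl (bfsA_innerU adj cur) nxt)
            ((F.foldl (bfsA_innerU adj cur) nxt).map (fun v => (v, d + 1)))
      ∧ (∀ x ∈ F.foldl (bfsA_innerU adj cur) nxt, x ∉ cur)
      ∧ (F.foldl (bfsA_innerU adj cur) nxt).Nodup := by
  intro F
  induction F with
  | nil =>
    intro cur nxt hdisj hnd
    exact ⟨by simp, hdisj, hnd⟩
  | cons u F ih =>
    intro cur nxt hdisj hnd
    obtain ⟨delta, h1, h2, h3, h4⟩ :=
      pv_scan cur (d + 1) (PySem.Dict.getD ⟨adj⟩ u []) nxt []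
    have hstep : bfsB_loop adj steps (cur ++ nxt)
        ((u :: F).map (fun u => (u, d)) ++ nxt.map (fun v => (v, d + 1)))
        = bfsB_loop adj steps (cur ++ (nxt ++ delta))
          (F.map (fun u => (u, d)) ++ (nxt ++ delta).map (fun v => (v, d + 1))) := by
      rw [List.map_cons, List.cons_append, bfsB_loop]
      simp only [hd, if_true]
      rw [show bfsB_scan (cur ++ nxt) (PySem.Dict.getD ⟨adj⟩ u []) (d + 1)
          = (cur ++ (nxt ++ delta), delta.map (fun v => (v, d + 1))) from by
        rw [bfsB_scan, h2]; simp]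
      simp [List.append_assoc]
    have hinner : bfsA_innerU adj cur nxt u = nxt ++ delta := h1
    have hdisj' : ∀ x ∈ nxt ++ delta, x ∉ cur := by
      intro x hx
      rcases List.mem_append.mp hx with h | h
      · exact hdisj x h
      · exact h3 x h
    have hnd' : (nxt ++ delta).Nodup := h4 hnd
    obtain ⟨e1, e2, e3⟩ := ih cur (nxt ++ delta) hdisj' hnd'
    refine ⟨?_, ?_, ?_⟩
    · rw [hstep, e1, List.foldl_cons, hinner]
    · rw [List.foldl_cons, hinner]; exact e2
    · rw [List.foldl_cons, hinner]; exact e3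

lemma pv_skip (adj : List (Int × List (Int × Int))) (steps : Int) :
    ∀ (pending : List (Int × Int)) (visited : PySem.Set Int),
      (∀ p ∈ pending, ¬ p.2 < steps) → bfsB_loop adj steps visited pending = visited := by
  intro pending
  induction pending with
  | nil => intro visited _; rw [bfsB_loop]
  | cons p rest ih =>
    intro visited h
    obtain ⟨u, d⟩ := p
    have hnd : ¬ d < steps := h (u, d) List.mem_cons_self
    rw [bfsB_loop]
    simp only [hnd, if_false]
    exact ih visited (fun q hq => h q (List.mem_cons_of_mem _ hq))

lemma pv_union : ∀ (t s : List Int), t.Nodup → (∀ x ∈ t, x ∉ s) →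
    PySem.Set.union s t = s ++ t := by
  intro t
  induction t with
  | nil => intro s _ _; simp [PySem.Set.union, PySem.Set.update]
  | cons a t ih =>
    intro s hnd hdisj
    have ha : a ∉ s := hdisj a List.mem_cons_self
    have hstep : PySem.Set.union s (a :: t) = PySem.Set.union (s ++ [a]) t := by
      simp [PySem.Set.union, PySem.Set.update, PySem.Set.add_of_not_mem ha]
    have hdisj' : ∀ x ∈ t, x ∉ s ++ [a] := by
      intro x hx hmem
      rcases List.mem_append.mp hmem with h | h
      · exact hdisj x (List.mem_cons_of_mem _ hx) h
      · rw [List.mem_singleton] at h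
        subst h
        exact (List.nodup_cons.mp hnd).1 hx
    rw [hstep, ih (s ++ [a]) (List.Nodup.of_cons hnd) hdisj']
    simp

lemma pv_main (adj : List (Int × List (Int × Int))) (steps : Int) :
    ∀ (n : Nat) (cur F : List Int) (d : Int), 0 ≤ d → (steps - d).toNat = n →
      bfsA_loop adj n cur F = bfsB_loop adj steps cur (F.map (fun u => (u, d))) := by
  intro n
  induction n with
  | zero =>
    intro cur F d hd hn
    have hns : ¬ (0 : Int) < steps - d := by omega
    rw [bfsA_loop]
    rw [pv_skip adj steps _ cur ?_]
    intro p hp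
    rcases List.mem_map.mp hp with ⟨u, _, rfl⟩
    simp only
    omega
  | succ n ih =>
    intro cur F d hd hn
    have hds : d < steps := by omega
    obtain ⟨e1, e2, e3⟩ := pv_level adj steps d hds F cur [] (by simp) List.nodup_nil
    set R := F.foldl (bfsA_innerU adj cur) [] with hR
    have e1' : bfsB_loop adj steps cur (F.map (fun u => (u, d)))
        = bfsB_loop adj steps (cur ++ R) (R.map (fun v => (v, d + 1))) := by
      simpa using e1
    rw [bfsA_loop]
    simp only [show (PySem.Set.empty : PySem.Set Int) = [] from rfl, ← hR]
    by_cases hRe : R = []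
    · rw [hRe]
      simp only [List.isEmpty_nil, if_true]
      rw [e1', hRe]
      simp [bfsB_loop]
    · have hie : R.isEmpty = false := by simp [hRe]
      simp only [hie, Bool.false_eq_true, if_false]
      rw [pv_union R cur e3 e2, e1']
      exact ih (cur ++ R) R (d + 1) (by omega) (by omega)

-- ===== VERDICT (by name: the statement is the Claim_ definition above) =====
theorem bfs_expand_spec : Claim_equal_bfs_expand := by
  intro adj seeds steps _
  unfold Spec_bfs_expand bfs_expand bfs_expand_alt
  rw [PySem.List.dedup_eq_ofList]
  exact pv_main adj steps steps.toNat _ _ 0 le_rfl (by simp)
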